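-- pv_equiv track=rewrite | github.com/zztin/SingleCellMultiOmics | singlecellmultiomics/utils/sequtils.py | create_MD_tag
-- ===== SOURCE A (Python) =====
-- def create_MD_tag(reference_seq, query_seq):
--     """Create MD tag
--     Args:
--         reference_seq (str) : reference sequence of alignment
--         query_seq (str) : query bases of alignment
--     Returns:
--         md_tag(str) : md description of the alignment
--     """
--     no_change = 0
--     md = []
--     for ref_base, query_base in zip(reference_seq, query_seq):
--         if ref_base.upper() == query_base:
--             no_change += 1
--         else:
--             if no_change > 0:
--                 md.append(str(no_change))
--             md.append(ref_base)
--             no_change = 0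
--     if no_change > 0:
--         md.append(str(no_change))
--     return ''.join(md)
-- ===== SOURCE B (Python) =====
-- from itertools import groupby
--
--
-- def create_MD_tag(reference_seq, query_seq):
--     """Create MD tag (run-grouping formulation)."""
--     parts = []
--     for is_match, group in groupby(zip(reference_seq, query_seq),
--                                    key=lambda pair: pair[0].upper() == pair[1]):
--         if is_match:
--             parts.append(str(sum(1 for _ in group)))
--         else:
--             parts.extend(ref_base for ref_base, _ in group)
--     return ''.join(parts)
-- ===== Notes on version B (the rewrite author's own statement) =====
-- stated objective: idiomatic
-- what changed: Replaces the manual running match-counter with its flush-before-mismatch and flush-at-end bookkeeping by itertools.groupby over zip(reference,query) keyed on match/mismatch: match runs emit their length, mismatch runs emit their reference bases.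
import Mathlib
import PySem

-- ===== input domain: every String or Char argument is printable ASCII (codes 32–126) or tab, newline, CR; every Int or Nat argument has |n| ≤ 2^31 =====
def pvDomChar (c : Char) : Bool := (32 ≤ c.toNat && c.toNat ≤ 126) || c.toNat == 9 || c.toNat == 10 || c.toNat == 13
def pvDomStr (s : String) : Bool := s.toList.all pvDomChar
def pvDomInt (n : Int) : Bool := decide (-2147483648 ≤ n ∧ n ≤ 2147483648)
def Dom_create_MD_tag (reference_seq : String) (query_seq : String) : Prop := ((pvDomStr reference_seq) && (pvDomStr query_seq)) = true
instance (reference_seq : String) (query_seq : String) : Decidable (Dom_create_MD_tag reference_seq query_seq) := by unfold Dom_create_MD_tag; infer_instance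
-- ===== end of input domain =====

-- B replaces A's running match-counter (with its flush-before-mismatch / flush-at-end bookkeeping)
-- by grouping the zipped pairs into match/mismatch runs (itertools.groupby): same cost, more idiomatic.

-- ===== PORT A =====
-- the final flush of the pending match counter, then ''.join
def pvFinish (r : Int × List String) : List String :=
  if r.1 > 0 then r.2 ++ [PySem.Int.toStr r.1] else r.2

def create_MD_tag (reference_seq : String) (query_seq : String) : String :=
  PySem.Str.join ""
    (pvFinish ((reference_seq.toList.zip query_seq.toList).foldl
      (fun (st : Int × List String) p =>
        if PySem.Chars.upperChar p.1 == p.2 then (st.1 + 1, st.2)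
        else (0, (st.2 ++ (if st.1 > 0 then [PySem.Int.toStr st.1] else [])) ++ [String.singleton p.1]))
      (0, [])))

-- ===== PORT B =====
-- port of itertools.groupby over the zipped pairs, key = (ref.upper() == query):
-- consecutive runs of equal key, front to back
def pvRuns (l : List (Char × Char)) : List (Bool × List (Char × Char)) :=
  match l with
  | [] => []
  | p :: t =>
    match pvRuns t with
    | (k, g) :: rest =>
        if (PySem.Chars.upperChar p.1 == p.2) = k then (k, p :: g) :: rest
        else ((PySem.Chars.upperChar p.1 == p.2), [p]) :: (k, g) :: rest
    | [] => [((PySem.Chars.upperChar p.1 == p.2), [p])]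

def create_MD_tag_alt (reference_seq : String) (query_seq : String) : String :=
  PySem.Str.join ""
    ((pvRuns (reference_seq.toList.zip query_seq.toList)).flatMap
      (fun kg => if kg.1 then [PySem.Int.toStr (kg.2.length : Int)]
                 else kg.2.map (fun p => String.singleton p.1)))

-- ===== PRECONDITION & SPEC =====
def Spec_create_MD_tag (reference_seq : String) (query_seq : String) (out : String) : Prop := out = create_MD_tag_alt reference_seq query_seq
instance (reference_seq : String) (query_seq : String) (out : String) : Decidable (Spec_create_MD_tag reference_seq query_seq out) := by unfold Spec_create_MD_tag; infer_instance

-- ===== CLAIM (what is proved, stated in full; the proofs are below) =====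
def Claim_equal_create_MD_tag : Prop := ∀ (reference_seq : String) (query_seq : String), Dom_create_MD_tag reference_seq query_seq → Spec_create_MD_tag reference_seq query_seq (create_MD_tag reference_seq query_seq)

-- ===== LEMMAS AND PROOFS =====

-- A's loop as a plain recursion producing the whole md list (including the final flush)
def pvGoA : Int → List (Char × Char) → List String
  | n, [] => if n > 0 then [PySem.Int.toStr n] else []
  | n, p :: t =>
      if PySem.Chars.upperChar p.1 == p.2 then pvGoA (n + 1) t
      else (if n > 0 then [PySem.Int.toStr n] else []) ++ [String.singleton p.1] ++ pvGoA 0 t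

theorem pvGoA_fold (t : List (Char × Char)) : ∀ (n : Int) (md : List String),
    pvFinish
      (t.foldl
        (fun (st : Int × List String) p =>
          if PySem.Chars.upperChar p.1 == p.2 then (st.1 + 1, st.2)
          else (0, (st.2 ++ (if st.1 > 0 then [PySem.Int.toStr st.1] else [])) ++ [String.singleton p.1]))
        (n, md))
    = md ++ pvGoA n t := by
  induction t with
  | nil => intro n md; by_cases h : n > 0 <;> simp [pvFinish, pvGoA, h]
  | cons p t ih =>
      intro n md
      rw [List.foldl_cons]
      by_cases h : (PySem.Chars.upperChar p.1 == p.2) = true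
      · rw [if_pos h, ih]
        simp [pvGoA, h]
      · rw [if_neg h, ih]
        by_cases h2 : n > 0 <;> simp [pvGoA, h, h2]

-- char-level bodies
def pvCharA (n : Int) (l : List (Char × Char)) : List Char :=
  ((pvGoA n l).map String.toList).flatten

def pvCharRest (rs : List (Bool × List (Char × Char))) : List Char :=
  ((rs.flatMap
      (fun kg => if kg.1 then [PySem.Int.toStr (kg.2.length : Int)]
                 else kg.2.map (fun p => String.singleton p.1))).map String.toList).flatten

-- length of the leading match-run / the runs after it
def pvLead (l : List (Char × Char)) : Nat :=
  match pvRuns l with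
  | (true, g) :: _ => g.length
  | _ => 0

def pvTail (l : List (Char × Char)) : List (Bool × List (Char × Char)) :=
  match pvRuns l with
  | (true, _) :: rest => rest
  | r => r

theorem pvCharA_nil (n : Int) :
    pvCharA n [] = if n > 0 then (PySem.Int.toStr n).toList else [] := by
  by_cases h : n > 0 <;> simp [pvCharA, pvGoA, h]

theorem pvCharA_cons (n : Int) (p : Char × Char) (t : List (Char × Char)) :
    pvCharA n (p :: t) =
      if PySem.Chars.upperChar p.1 == p.2 then pvCharA (n + 1) t
      else (if n > 0 then (PySem.Int.toStr n).toList else []) ++ p.1 :: pvCharA 0 t := by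
  by_cases h : PySem.Chars.upperChar p.1 == p.2 <;>
    by_cases h2 : n > 0 <;> simp [pvCharA, pvGoA, h, h2]

-- the joint invariant: pvCharA 0 matches the rendered runs, and a positive pending counter n
-- merges with the leading match-run
theorem pvMain (l : List (Char × Char)) :
    pvCharA 0 l = pvCharRest (pvRuns l) ∧
    ∀ n : Int, 0 < n →
      pvCharA n l = (PySem.Int.toStr (n + (pvLead l : Int))).toList ++ pvCharRest (pvTail l) := by
  induction l with
  | nil =>
      constructor
      · simp [pvCharA_nil, pvRuns, pvCharRest]
      · intro n hn
        simp [pvCharA_nil, hn, pvRuns, pvLead, pvTail, pvCharRest]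
  | cons p t ih =>
      obtain ⟨ih0, ihn⟩ := ih
      by_cases hk : (PySem.Chars.upperChar p.1 == p.2) = true
      · -- matching pair: it joins (or starts) the leading match-run
        rcases hr : pvRuns t with _ | ⟨⟨k, g⟩, rest⟩
        · have hlead : pvLead t = 0 := by simp [pvLead, hr]
          have htail : pvTail t = [] := by simp [pvTail, hr]
          have hrc : pvRuns (p :: t) = [(true, [p])] := by simp [pvRuns, hr, hk]
          constructor
          · have h1 := ihn 1 (by norm_num)
            rw [pvCharA_cons, if_pos hk]
            simp only [zero_add]
            rw [h1, hlead, htail]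
            simp [hrc, pvCharRest, PySem.Int.toList_toStr]
          · intro n hn
            have h1 := ihn (n + 1) (by omega)
            rw [pvCharA_cons, if_pos hk, h1, hlead, htail]
            have hl : pvLead (p :: t) = 1 := by simp [pvLead, hrc]
            have ht : pvTail (p :: t) = [] := by simp [pvTail, hrc]
            simp [hl, ht, pvCharRest, PySem.Int.toList_toStr]
        · cases k
          · -- head run of t is a mismatch run: p starts a new match-run of length 1
            have hlead : pvLead t = 0 := by simp [pvLead, hr]
            have htail : pvTail t = (false, g) :: rest := by simp [pvTail, hr]
            have hrc : pvRuns (p :: t) = (true, [p]) :: (false, g) :: rest := by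
              simp [pvRuns, hr, hk]
            constructor
            · have h1 := ihn 1 (by norm_num)
              rw [pvCharA_cons, if_pos hk]
              simp only [zero_add]
              rw [h1, hlead, htail]
              simp [hrc, pvCharRest, PySem.Int.toList_toStr]
            · intro n hn
              have h1 := ihn (n + 1) (by omega)
              rw [pvCharA_cons, if_pos hk, h1, hlead, htail]
              have hl : pvLead (p :: t) = 1 := by simp [pvLead, hrc]
              have ht : pvTail (p :: t) = (false, g) :: rest := by simp [pvTail, hrc]
              simp [hl, ht, pvCharRest, PySem.Int.toList_toStr]
          · -- head run of t is a match run: p extends it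
            have hlead : pvLead t = g.length := by simp [pvLead, hr]
            have htail : pvTail t = rest := by simp [pvTail, hr]
            have hrc : pvRuns (p :: t) = (true, p :: g) :: rest := by
              simp [pvRuns, hr, hk]
            constructor
            · have h1 := ihn 1 (by norm_num)
              rw [pvCharA_cons, if_pos hk]
              simp only [zero_add]
              rw [h1, hlead, htail, hrc]
              simp [pvCharRest, PySem.Int.toList_toStr]
              ring_nf
            · intro n hn
              have h1 := ihn (n + 1) (by omega)
              rw [pvCharA_cons, if_pos hk, h1, hlead, htail]
              have hl : pvLead (p :: t) = g.length + 1 := by simp [pvLead, hrc]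
              have ht : pvTail (p :: t) = rest := by simp [pvTail, hrc]
              rw [hl, ht]
              simp [PySem.Int.toList_toStr]
              ring_nf
      · -- mismatching pair: it joins (or starts) the leading mismatch run
        have hB : pvCharRest (pvRuns (p :: t)) = p.1 :: pvCharRest (pvRuns t) := by
          rcases hr : pvRuns t with _ | ⟨⟨k, g⟩, rest⟩
          · simp [pvRuns, hr, hk, pvCharRest]
          · cases k
            · have h2 : pvRuns (p :: t) = (false, p :: g) :: rest := by simp [pvRuns, hr, hk]
              simp [h2, pvCharRest]
            · have h2 : pvRuns (p :: t) = (false, [p]) :: (true, g) :: rest := by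
                simp [pvRuns, hr, hk]
              simp [h2, pvCharRest]
        have h0 : pvCharA 0 (p :: t) = pvCharRest (pvRuns (p :: t)) := by
          rw [pvCharA_cons, if_neg hk, ih0, hB]
          simp
        have hhead : pvLead (p :: t) = 0 ∧ pvTail (p :: t) = pvRuns (p :: t) := by
          rcases hr : pvRuns t with _ | ⟨⟨k, g⟩, rest⟩
          · constructor <;> simp [pvLead, pvTail, pvRuns, hr, hk]
          · cases k
            · have h2 : pvRuns (p :: t) = (false, p :: g) :: rest := by simp [pvRuns, hr, hk]
              constructor <;> simp [pvLead, pvTail, h2]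
            · have h2 : pvRuns (p :: t) = (false, [p]) :: (true, g) :: rest := by
                simp [pvRuns, hr, hk]
              constructor <;> simp [pvLead, pvTail, h2]
        refine ⟨h0, fun n hn => ?_⟩
        rw [pvCharA_cons, if_neg hk, if_pos hn, hhead.1, hhead.2, ih0, hB, ← hB, ← h0]
        rw [pvCharA_cons, if_neg hk]
        simp [ih0]

theorem pv_join_eq (parts : List String) :
    PySem.Str.join "" parts = String.ofList ((parts.map String.toList).flatten) := by
  have : ∀ ps : List (List Char), PySem.Chars.join [] ps = ps.flatten := by
    intro ps
    induction ps with
    | nil => simp [PySem.Chars.join_nil]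
    | cons a ps ih =>
        cases ps with
        | nil => simp [PySem.Chars.join_singleton]
        | cons b r => rw [PySem.Chars.join_cons_cons, ih]; simp
  simp [PySem.Str.join, this]

-- ===== VERDICT (by name: the statement is the Claim_ definition above) =====
theorem create_MD_tag_spec : Claim_equal_create_MD_tag := by
  intro r q _
  unfold Spec_create_MD_tag create_MD_tag create_MD_tag_alt
  rw [pvGoA_fold (r.toList.zip q.toList) 0 []]
  rw [pv_join_eq, pv_join_eq]
  simp only [List.nil_append]
  have h := (pvMain (r.toList.zip q.toList)).1
  simp only [pvCharA, pvCharRest] at h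
  rw [h]
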